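-- pv_equiv track=rewrite | github.com/Tachirilmrv/Numerica | notebooks/Separación de raíces/utils.py | negative_interval
-- ===== SOURCE A (Python) =====
-- def positive_max_grade(values):
--     """
--     Transforma la ecuación y convierte el coeficiente de mayor grado a positivo.
--
--     Argumentos:
--     ----------
--     values - coeficientes de la ecuación.
--
--     Devuelve:
--     --------
--     Lista de los coeficientes transformados.
--     """
--
--     coefficients = [i * (-1) for i in values]
--
--     return coefficients
--
-- def negative_interval(values):
--     """
--     Transforma la ecuacion para hallar los ceros del intervalo negativo
--
--     Argumentos:
--     ----------
--     values - coeficientes de la ecuacion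
--
--     Devuelve:
--     --------
--     La lista de los coeficientes para el intervalo negativo
--     """
--
--     result = list.copy(values)
--
--     if len(values) % 2 == 0:  # si tiene una cantidad par de coeficientes significa que el grado es impar
--         i = 0
--         result = positive_max_grade(values)
--     else:
--         i = 1
--
--     for v in range(i, len(result) - 1, 2):
--         result[v] = result[v] * (-1)
--
--     return result
-- ===== SOURCE B (Python) =====
-- def negative_interval(values):
--     return [-v if i % 2 else v for i, v in enumerate(values)]
-- ===== Notes on version B (the rewrite author's own statement) =====
-- stated objective: simpler
-- what changed: Replaced the parity branch, helper call and in-place stepped-index mutation loop with a single comprehension that flips the sign at each odd index, since both of A's branches amount to multiplying coefficient i by (-1)**i.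
import Mathlib
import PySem

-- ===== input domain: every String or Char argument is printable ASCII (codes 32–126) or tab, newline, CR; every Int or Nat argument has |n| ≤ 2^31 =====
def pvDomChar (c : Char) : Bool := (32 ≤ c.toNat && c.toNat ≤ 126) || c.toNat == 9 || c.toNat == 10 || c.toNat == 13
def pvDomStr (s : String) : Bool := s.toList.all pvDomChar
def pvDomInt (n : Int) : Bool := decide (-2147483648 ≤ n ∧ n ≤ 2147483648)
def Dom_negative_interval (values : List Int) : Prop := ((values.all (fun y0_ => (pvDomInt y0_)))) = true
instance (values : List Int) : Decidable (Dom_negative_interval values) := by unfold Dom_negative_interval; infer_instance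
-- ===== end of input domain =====

-- B replaces A's parity branch, helper call and in-place stepped-index loop with one
-- sign-flipping comprehension over enumerate (objective: simpler; same O(n) cost).

-- ===== PORT A =====
def positive_max_grade (values : List Int) : List Int :=
  values.map (fun i => i * (-1))

def negative_interval (values : List Int) : List Int :=
  -- result = list.copy(values); branch on len parity; then for v in range(i, len(result)-1, 2): result[v] *= -1
  let result := values
  if PySem.Int.mod (PySem.List.len values) 2 = 0 then
    let result := positive_max_grade values
    (PySem.List.pyRange 0 (PySem.List.len result - 1) 2).foldl
      (fun r v => PySem.List.pySetD r v (PySem.List.pyGetD r v 0 * (-1))) result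
  else
    (PySem.List.pyRange 1 (PySem.List.len result - 1) 2).foldl
      (fun r v => PySem.List.pySetD r v (PySem.List.pyGetD r v 0 * (-1))) result

-- ===== PORT B =====
def negative_interval_alt (values : List Int) : List Int :=
  (PySem.List.enumerate values).map (fun p => if PySem.Int.mod p.1 2 ≠ 0 then -p.2 else p.2)

-- ===== PRECONDITION & SPEC =====
def Spec_negative_interval (values : List Int) (out : List Int) : Prop := out = negative_interval_alt values
instance (values : List Int) (out : List Int) : Decidable (Spec_negative_interval values out) := by unfold Spec_negative_interval; infer_instance

-- ===== CLAIM (what is proved, stated in full; the proofs are below) =====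
def Claim_equal_negative_interval : Prop := ∀ (values : List Int), Dom_negative_interval values → Spec_negative_interval values (negative_interval values)

-- ===== LEMMAS AND PROOFS =====

-- A's flip loop, elementwise: folding the per-index negation over a duplicate-free list of
-- in-range indices negates exactly the entries whose index is in the list.
theorem pv_foldl_get (L : List Int) : ∀ (r : List Int), L.Nodup →
    (∀ x ∈ L, 0 ≤ x ∧ x < (r.length : Int)) → ∀ (k : Nat),
    (L.foldl (fun r v => PySem.List.pySetD r v (PySem.List.pyGetD r v 0 * (-1))) r)[k]? =
      if (k : Int) ∈ L then r[k]?.map (fun x => -x) else r[k]? := by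
  induction L with
  | nil => intro r _ _ k; simp
  | cons a L ih =>
    intro r hnd hb k
    obtain ⟨ha0, halt⟩ := hb a (List.mem_cons_self)
    have hlt : a.toNat < r.length := by omega
    have hset : PySem.List.pySetD r a (PySem.List.pyGetD r a 0 * (-1)) =
        r.set a.toNat (r[a.toNat] * (-1)) := by
      rw [PySem.List.pySetD_of_nonneg r _ ha0, PySem.List.pyGetD_eq_getElem r 0 ha0 halt]
    have hnotmem : a ∉ L := (List.nodup_cons.mp hnd).1
    have hIH := ih (r.set a.toNat (r[a.toNat] * (-1))) (List.nodup_cons.mp hnd).2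
      (by intro x hx; have := hb x (List.mem_cons_of_mem a hx); simpa using this) k
    rw [List.foldl_cons, hset, hIH]
    by_cases hk : (k : Int) = a
    · have hka : k = a.toNat := by omega
      subst hka
      rw [if_neg (by rw [hk]; exact hnotmem),
          if_pos (by rw [hk]; exact List.mem_cons_self),
          List.getElem?_set_self hlt, List.getElem?_eq_getElem hlt]
      simp only [Option.map_some]
      congr 1; ring
    · have hne : a.toNat ≠ k := by omega
      rw [List.getElem?_set_ne hne]
      simp only [List.mem_cons, hk, false_or]

-- indices of a step-2 range are pairwise distinct
theorem pv_nodup_range2 (a b : Int) : (PySem.List.pyRange a b 2).Nodup := by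
  rw [PySem.List.pyRange_of_pos a b (by norm_num)]
  exact (List.nodup_range).map (fun x y h => by omega)

theorem pv_alt_get (values : List Int) (k : Nat) :
    (negative_interval_alt values)[k]? =
      values[k]?.map (fun v => if k % 2 = 1 then -v else v) := by
  unfold negative_interval_alt
  rw [List.getElem?_map, PySem.List.getElem?_enumerate, Option.map_map]
  cases values[k]? with
  | none => rfl
  | some v =>
    simp only [Option.map_some, Function.comp, zero_add]
    have hm : PySem.Int.mod (k : Int) 2 = ((k % 2 : Nat) : Int) := PySem.Int.mod_natCast k 2
    rw [hm]
    by_cases h : k % 2 = 1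
    · simp [h]
    · have h0 : k % 2 = 0 := by omega
      simp [h0]

-- ===== VERDICT (by name: the statement is the Claim_ definition above) =====
theorem negative_interval_spec : Claim_equal_negative_interval := by
  intro values _
  unfold Spec_negative_interval negative_interval
  apply List.ext_getElem?
  intro k
  rw [pv_alt_get]
  simp only [PySem.List.len_eq]
  by_cases hpar : PySem.Int.mod ((values.length : Int)) 2 = 0
  · -- even number of coefficients
    have hdvd : (2 : Int) ∣ (values.length : Int) := (PySem.Int.mod_eq_zero_iff_dvd _ _).mp hpar
    rw [if_pos hpar]
    have hlen : (positive_max_grade values).length = values.length := by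
      simp [positive_max_grade]
    rw [pv_foldl_get _ _ (pv_nodup_range2 _ _)
      (by intro x hx
          rw [PySem.List.mem_pyRange_iff_of_pos (by norm_num)] at hx
          rw [hlen]; omega)]
    simp only [PySem.List.mem_pyRange_iff_of_pos (show (0:Int) < 2 by norm_num),
      positive_max_grade, List.getElem?_map, List.length_map]
    cases h : values[k]? with
    | none => simp
    | some v =>
      have hk : k < values.length := by
        by_contra hge
        rw [List.getElem?_eq_none (by omega)] at h; simp at h
      simp only [h, Option.map_some]
      split_ifs with hc h1 h1
      · exfalso; omega
      · congr 1; ring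
      · congr 1; ring
      · exfalso; omega
  · -- odd number of coefficients
    have hndvd : ¬ (2 : Int) ∣ (values.length : Int) := fun hd =>
      hpar ((PySem.Int.mod_eq_zero_iff_dvd _ _).mpr hd)
    rw [if_neg hpar]
    rw [pv_foldl_get _ _ (pv_nodup_range2 _ _)
      (by intro x hx
          rw [PySem.List.mem_pyRange_iff_of_pos (by norm_num)] at hx
          omega)]
    simp only [PySem.List.mem_pyRange_iff_of_pos (show (0:Int) < 2 by norm_num)]
    cases h : values[k]? with
    | none => simp
    | some v =>
      have hk : k < values.length := by
        by_contra hge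
        rw [List.getElem?_eq_none (by omega)] at h; simp at h
      simp only [h, Option.map_some]
      split_ifs with hc h1 h1
      · rfl
      · exfalso; omega
      · exfalso; omega
      · rfl
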